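-- pv_equiv track=rewrite | github.com/memoryonrepeat/algo | leetcode/2268-min-number-of-keypresses.py | minimumKeypresses
-- ===== SOURCE A (Python) =====
-- from collections import Counter
--
-- def minimumKeypresses(s: str) -> int:
--     c = Counter(s)
--     _s = sorted(s, key = lambda k: c[k], reverse = True)
--     keypad = {}
--     total = 0
--     for char in _s:
--         if char not in keypad:
--             if len(keypad) < 9:
--                 keypad[char] = 1
--             elif len(keypad) < 18:
--                 keypad[char] = 2
--             else:
--                 keypad[char] = 3
--         total += keypad[char]
--
--     return total
-- ===== SOURCE B (Python) =====
-- from collections import Counter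
--
-- def minimumKeypresses(s: str) -> int:
--     total = 0
--     for i, f in enumerate(sorted(Counter(s).values(), reverse=True)):
--         total += f * min(i // 9 + 1, 3)
--     return total
-- ===== Notes on version B (the rewrite author's own statement) =====
-- stated objective: faster
-- what changed: B sorts only the distinct-character counts (Counter values) descending and sums freq * min(i//9 + 1, 3) with enumerate, instead of A's stable sort of the whole string followed by a per-character loop that grows a keypad dict through a three-branch cascade and accumulates dict lookups.
import Mathlib
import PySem

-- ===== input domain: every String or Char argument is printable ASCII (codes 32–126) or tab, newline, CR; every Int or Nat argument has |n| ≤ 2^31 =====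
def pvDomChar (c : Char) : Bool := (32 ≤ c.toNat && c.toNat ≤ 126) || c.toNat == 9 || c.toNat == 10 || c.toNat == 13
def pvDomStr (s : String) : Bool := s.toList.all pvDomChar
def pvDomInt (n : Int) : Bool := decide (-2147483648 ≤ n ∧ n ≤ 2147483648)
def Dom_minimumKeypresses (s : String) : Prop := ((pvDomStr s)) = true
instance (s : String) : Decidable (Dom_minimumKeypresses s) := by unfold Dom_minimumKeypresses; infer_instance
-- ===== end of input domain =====

-- B replaces A's per-character loop (stable sort of the whole string + a keypad dict grown
-- with a 3-branch cascade) by sorting the distinct-character counts descending and summing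
-- freq * min(i//9 + 1, 3) over them with enumerate (measured faster); the return value is identical.

-- ===== PORT A =====
-- one step of A's 'for char in _s' loop: state = (keypad, total); keypad[char] is always
-- present when it is read, so 'getD _ 0' is exact (Python's keypad[char] cannot raise here)
def aStep (st : PySem.Dict Char Int × Int) (ch : Char) : PySem.Dict Char Int × Int :=
  let keypad :=
    if st.1.contains ch then st.1
    else if st.1.size < 9 then st.1.insert ch 1
    else if st.1.size < 18 then st.1.insert ch 2
    else st.1.insert ch 3
  (keypad, st.2 + keypad.getD ch 0)

def minimumKeypresses (s : String) : Int :=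
  let c := PySem.Dict.counter s.toList
  let sSorted := PySem.List.sorted s.toList (fun k => c.getD k 0) true
  (sSorted.foldl aStep (PySem.Dict.empty, 0)).2

-- ===== PORT B =====
def minimumKeypresses_alt (s : String) : Int :=
  let freqs := PySem.List.sorted (PySem.Dict.counter s.toList).values (fun v => v) true
  (PySem.List.enumerate freqs 0).foldl
    (fun total p => total + p.2 * min (PySem.Int.floordiv p.1 9 + 1) 3) 0

-- ===== PRECONDITION & SPEC =====
def Spec_minimumKeypresses (s : String) (out : Int) : Prop := out = minimumKeypresses_alt s
instance (s : String) (out : Int) : Decidable (Spec_minimumKeypresses s out) := by unfold Spec_minimumKeypresses; infer_instance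

-- ===== CLAIM (what is proved, stated in full; the proofs are below) =====
def Claim_equal_minimumKeypresses : Prop := ∀ (s : String), Dom_minimumKeypresses s → Spec_minimumKeypresses s (minimumKeypresses s)

-- ===== LEMMAS AND PROOFS =====

-- key-slot cost of the j-th distinct character (0-based), as both programs compute it
def bucket (j : Nat) : Int := if j < 9 then 1 else if j < 18 then 2 else 3

-- the common abstract value of both programs: Σ_k freqs[k] * bucket (j + k)
def bsum : List Int → Nat → Int
  | [], _ => 0
  | f :: fs, j => f * bucket j + bsum fs (j + 1)

lemma ofList_sublist (l : List Char) : (PySem.Set.ofList l).Sublist l := by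
  induction l using List.reverseRecOn with
  | nil => simp [PySem.Set.ofList]
  | append_singleton xs x ih =>
      rw [PySem.Set.ofList_append_singleton, PySem.Set.add_eq_ite]
      split
      · exact ih.trans (List.sublist_append_left _ _)
      · exact List.Sublist.append ih (List.Sublist.refl _)

lemma idxOf_append_not_mem (K t : List Char) (a : Char) (h : a ∉ K) :
    (K ++ a :: t).idxOf a = K.length := by
  induction K with
  | nil => simp
  | cons x xs ih =>
      simp only [List.mem_cons, not_or] at h
      rw [List.cons_append, List.idxOf_cons_ne _ (by simpa using (Ne.symm h.1)), ih h.2]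
      simp

lemma idxOf_update_of_mem (K l : List Char) (a : Char) (h : a ∈ K) :
    (PySem.Set.update K l).idxOf a = K.idxOf a := by
  rw [PySem.Set.update_eq_append_filter, List.idxOf_append_of_mem h]

-- A's loop invariant: from a keypad that stores bucket-of-rank for every key it contains,
-- the loop adds Σ_{x ∈ l} bucket (rank of x in the final first-occurrence order)
lemma foldA_spec (l : List Char) : ∀ (d : PySem.Dict Char Int) (t : Int),
    d.keys.Nodup →
    (∀ x, d.contains x = true → d.getD x 0 = bucket (d.keys.idxOf x)) →
    (l.foldl aStep (d, t)).2
      = t + (l.map (fun x => bucket ((PySem.Set.update d.keys l).idxOf x))).sum := by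
  induction l with
  | nil => intro d t _ _; simp
  | cons a l ih =>
      intro d t hnd hinv
      rw [List.foldl_cons]
      by_cases hc : d.contains a = true
      · have hmem : a ∈ d.keys := (PySem.Dict.contains_iff_mem_keys d a).mp hc
        have hstep : aStep (d, t) a = (d, t + bucket (d.keys.idxOf a)) := by
          simp [aStep, hc, hinv a hc]
        have hU : PySem.Set.update d.keys (a :: l) = PySem.Set.update d.keys l := by
          rw [PySem.Set.update_cons, PySem.Set.add_of_mem hmem]
        rw [hstep, ih d _ hnd hinv, hU, List.map_cons, List.sum_cons,
            idxOf_update_of_mem _ _ _ hmem]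
        ring
      · have hnm : a ∉ d.keys := fun hm => hc ((PySem.Dict.contains_iff_mem_keys d a).mpr hm)
        have hsize : d.size = d.keys.length := by simp [PySem.Dict.size, PySem.Dict.keys]
        set n := d.keys.length with hn
        have hstep : aStep (d, t) a
            = (d.insert a (bucket n), t + bucket n) := by
          simp only [aStep, hc, if_false, hsize, Bool.false_eq_true]
          unfold bucket
          split_ifs <;> simp_all [PySem.Dict.getD_insert_self]
        have hkeys : (d.insert a (bucket n)).keys = d.keys ++ [a] :=
          PySem.Dict.keys_insert_of_not_contains d (bucket n) (by simpa using hc)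
        have hnd' : (d.insert a (bucket n)).keys.Nodup := by
          rw [hkeys]
          rw [List.nodup_append]
          refine ⟨hnd, List.nodup_singleton a, ?_⟩
          intro x hx y hy
          simp only [List.mem_singleton] at hy
          subst hy
          exact fun e => hnm (e ▸ hx)
        have hinv' : ∀ x, (d.insert a (bucket n)).contains x = true →
            (d.insert a (bucket n)).getD x 0 = bucket ((d.insert a (bucket n)).keys.idxOf x) := by
          intro x hx
          by_cases hxa : x = a
          · subst hxa
            rw [PySem.Dict.getD_insert_self, hkeys,
                idxOf_append_not_mem d.keys [] x hnm]
          · rw [PySem.Dict.getD_insert_of_ne d (bucket n) 0 hxa, hkeys,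
                List.idxOf_append_of_mem]
            · apply hinv
              rw [PySem.Dict.contains_insert] at hx
              simpa [hxa] using hx
            · have hcx : d.contains x = true := by
                rw [PySem.Dict.contains_insert] at hx
                simpa [hxa] using hx
              exact (PySem.Dict.contains_iff_mem_keys d x).mp hcx
        have hU : PySem.Set.update d.keys (a :: l)
            = PySem.Set.update (d.insert a (bucket n)).keys l := by
          rw [PySem.Set.update_cons, PySem.Set.add_of_not_mem hnm, hkeys]
        have hamem : a ∈ (d.insert a (bucket n)).keys := by rw [hkeys]; simp
        have hidxa : (d.insert a (bucket n)).keys.idxOf a = n := by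
          rw [hkeys]; exact idxOf_append_not_mem d.keys [] a hnm
        rw [hstep, ih _ _ hnd' hinv', hU, List.map_cons, List.sum_cons,
            idxOf_update_of_mem _ _ _ hamem, hidxa]
        ring

-- a 0-except-at-a sum over a nodup covering list picks out the single term at a
lemma sum_single (D : List Char) (a : Char) (h : D.Nodup) (ha : a ∈ D) (g : Char → Int) :
    (D.map (fun y => if y = a then g y else 0)).sum = g a := by
  induction D with
  | nil => simp at ha
  | cons y D ih =>
      rcases List.mem_cons.mp ha with rfl | hm
      · have : ∀ z ∈ D, (if z = a then g z else 0) = 0 := by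
          intro z hz
          have : z ≠ a := fun e => (List.nodup_cons.mp h).1 (e ▸ hz)
          simp [this]
        simp [List.map_congr_left this]
      · have hy : y ≠ a := fun e => (List.nodup_cons.mp h).1 (e ▸ hm)
        simp [hy, ih (List.nodup_cons.mp h).2 hm]

-- Σ over l of a per-character value = Σ over a covering nodup list, weighted by counts
lemma group_by_count (l : List Char) : ∀ (D : List Char) (g : Char → Int), D.Nodup →
    (∀ x ∈ l, x ∈ D) →
    (l.map g).sum = (D.map (fun y => (l.count y : Int) * g y)).sum := by
  induction l with
  | nil => intro D g _ _; simp
  | cons a l ih =>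
      intro D g hD hsub
      have ha : a ∈ D := hsub a (by simp)
      have : ∀ y ∈ D, ((a :: l).count y : Int) * g y
          = (l.count y : Int) * g y + (if y = a then g y else 0) := by
        intro y _
        by_cases hy : y = a
        · subst hy; rw [List.count_cons_self]; push_cast; ring_nf; simp
        · rw [List.count_cons_of_ne (Ne.symm (by simpa using hy))]; simp [hy]
      rw [List.map_cons, List.sum_cons, ih D g hD (fun x hx => hsub x (by simp [hx])),
          List.map_congr_left this]
      rw [List.sum_map_add, sum_single D a hD ha g]
      ring

-- a count-weighted sum over a nodup list in rank order is bsum of the count list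
lemma rank_sum (D : List Char) : ∀ (j : Nat) (cnt : Char → Int), D.Nodup →
    (D.map (fun y => cnt y * bucket (j + D.idxOf y))).sum = bsum (D.map cnt) j := by
  induction D with
  | nil => intro j cnt _; simp [bsum]
  | cons y D ih =>
      intro j cnt hD
      have hy : y ∉ D := (List.nodup_cons.mp hD).1
      have : ∀ z ∈ D, cnt z * bucket (j + (y :: D).idxOf z)
          = cnt z * bucket ((j+1) + D.idxOf z) := by
        intro z hz
        have hzy : z ≠ y := fun e => hy (e ▸ hz)
        rw [List.idxOf_cons_ne _ (by simpa using (Ne.symm hzy))]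
        have h4 : j + (D.idxOf z).succ = (j+1) + D.idxOf z := by omega
        rw [h4]
      rw [List.map_cons, List.sum_cons, List.map_congr_left this, ih (j+1) cnt (List.nodup_cons.mp hD).2]
      simp [bsum]

-- B's loop computes bsum of the frequency list
lemma foldB_spec (fs : List Int) : ∀ (j : Nat) (t : Int),
    (PySem.List.enumerate fs (j : Int)).foldl
      (fun total p => total + p.2 * min (PySem.Int.floordiv p.1 9 + 1) 3) t
      = t + bsum fs j := by
  induction fs with
  | nil => intro j t; simp [PySem.List.enumerate, bsum]
  | cons f fs ih =>
      intro j t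
      have h1 : PySem.List.enumerate (f :: fs) (j:Int) = ((j:Int), f) :: PySem.List.enumerate fs ((j:Int)+1) := rfl
      have h2 : ((j:Int) + 1) = ((j+1 : Nat) : Int) := by push_cast; ring
      have h3 : min (PySem.Int.floordiv (j:Int) 9 + 1) 3 = bucket j := by
        rw [show ((9:Int) = ((9:Nat):Int)) from rfl, PySem.Int.floordiv_natCast]
        unfold bucket; split_ifs <;> omega
      rw [h1, List.foldl_cons, h2, ih, h3,
        show bsum (f::fs) j = f * bucket j + bsum fs (j+1) from rfl]
      ring

-- sorted(values, reverse=True) is the count list in first-occurrence order of the sorted string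
lemma freqs_eq (s : String) :
    PySem.List.sorted (PySem.Dict.counter s.toList).values (fun v => v) true
      = (PySem.Set.ofList (PySem.List.sorted s.toList
            (fun k => (PySem.Dict.counter s.toList).getD k 0) true)).map
          (fun y => (s.toList.count y : Int)) := by
  set key : Char → Int := fun k => (PySem.Dict.counter s.toList).getD k 0 with hkey
  set sS := PySem.List.sorted s.toList key true with hsS
  set D := PySem.Set.ofList sS with hD
  have hvals : (PySem.Dict.counter s.toList).values
      = (PySem.Set.ofList s.toList).map (fun y => (s.toList.count y : Int)) := by
    simp [PySem.Dict.values, PySem.Dict.items_counter, List.map_map, Function.comp]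
  have hDperm : D.Perm (PySem.Set.ofList s.toList) := by
    rw [List.perm_ext_iff_of_nodup (PySem.Set.nodup_ofList _) (PySem.Set.nodup_ofList _)]
    intro x
    rw [PySem.Set.mem_ofList, PySem.Set.mem_ofList, hsS, PySem.List.mem_sorted]
  have hperm : (D.map (fun y => (s.toList.count y : Int))).Perm
      (PySem.List.sorted (PySem.Dict.counter s.toList).values (fun v => v) true) := by
    rw [hvals]
    exact (hDperm.map _).trans (PySem.List.sorted_perm _ _ _).symm
  have hp1 : (PySem.List.sorted (PySem.Dict.counter s.toList).values (fun v => v) true).Pairwise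
      (fun a b => b ≤ a) := PySem.List.sorted_pairwise_rev _ _
  have hp2 : (D.map (fun y => (s.toList.count y : Int))).Pairwise (fun a b => b ≤ a) := by
    have hs : sS.Pairwise (fun a b => key b ≤ key a) := PySem.List.sorted_pairwise_rev _ _
    have hDp : D.Pairwise (fun a b => key b ≤ key a) := hs.sublist (ofList_sublist sS)
    rw [List.pairwise_map]
    have : ∀ y, key y = (s.toList.count y : Int) := by
      intro y; rw [hkey]; exact PySem.Dict.getD_counter _ _
    exact hDp.imp (by intro a b h; rw [← this a, ← this b]; exact h)
  exact (hperm.eq_of_pairwise (fun a b _ _ hab hba => le_antisymm hba hab) hp2 hp1).symm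

-- ===== VERDICT (by name: the statement is the Claim_ definition above) =====
theorem minimumKeypresses_spec : Claim_equal_minimumKeypresses := by
  intro s _
  unfold Spec_minimumKeypresses
  set key : Char → Int := fun k => (PySem.Dict.counter s.toList).getD k 0 with hkey
  set sS := PySem.List.sorted s.toList key true with hsS
  set D := PySem.Set.ofList sS with hD
  have hcnt : ∀ y, (sS.count y : Int) = (s.toList.count y : Int) := by
    intro y
    rw [(PySem.List.sorted_perm s.toList key true).count_eq]
  have hA : minimumKeypresses s
      = bsum (D.map (fun y => (s.toList.count y : Int))) 0 := by
    show ((sS.foldl aStep (PySem.Dict.empty, 0)).2 : Int) = _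
    rw [foldA_spec sS PySem.Dict.empty 0 (by simp) (by intro x hx; simp at hx)]
    have hup : PySem.Set.update (PySem.Dict.empty : PySem.Dict Char Int).keys sS = D := rfl
    rw [hup, group_by_count sS D _ (PySem.Set.nodup_ofList _)
          (fun x hx => (PySem.Set.mem_ofList _ _).mpr hx)]
    rw [List.map_congr_left (by
      intro y _
      rw [hcnt y, show D.idxOf y = 0 + D.idxOf y by omega] : ∀ y ∈ D, _ = _)]
    rw [rank_sum D 0 _ (PySem.Set.nodup_ofList _)]
    simp
  have hB : minimumKeypresses_alt s
      = bsum (D.map (fun y => (s.toList.count y : Int))) 0 := by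
    show ((PySem.List.enumerate (PySem.List.sorted (PySem.Dict.counter s.toList).values (fun v => v) true) 0).foldl
      (fun total p => total + p.2 * min (PySem.Int.floordiv p.1 9 + 1) 3) 0 : Int) = _
    rw [show (0:Int) = ((0:Nat):Int) from rfl, foldB_spec, freqs_eq s]
    rw [Nat.cast_zero, zero_add, ← hkey, ← hsS, ← hD]
  rw [hA, hB]
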